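-- pv_equiv track=rewrite | github.com/TeodorVitelaru/csubb | semestrul 4/ai/lab1_ai/pr4.py | pr4
-- ===== SOURCE A (Python) =====
-- def pr4(str):
--     arr_cuv = str.split(" ")
--     frecventa = {}
--     for cuv in arr_cuv:
--         if cuv not in frecventa:
--             frecventa[cuv] = 1
--         else:
--             frecventa[cuv] += 1
--     cuv_fara_frecventa = []
--     for key in frecventa:
--         if frecventa[key] == 1:
--             cuv_fara_frecventa.append(key)
--     return cuv_fara_frecventa
-- ===== SOURCE B (Python) =====
-- def pr4(str):
--     words = str.split(" ")
--     seen_once = set()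
--     seen_more = set()
--     for w in words:
--         if w in seen_once:
--             seen_once.discard(w)
--             seen_more.add(w)
--         elif w not in seen_more:
--             seen_once.add(w)
--     return [w for w in words if w in seen_once]
-- ===== Notes on version B (the rewrite author's own statement) =====
-- stated objective: alternative
-- what changed: Replaced the dict-of-counts plus key-iteration pass with a single pass maintaining two sets (seen_once/seen_more) and a final filter of the original word list, preserving first-occurrence order without counting.
import Mathlib
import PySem

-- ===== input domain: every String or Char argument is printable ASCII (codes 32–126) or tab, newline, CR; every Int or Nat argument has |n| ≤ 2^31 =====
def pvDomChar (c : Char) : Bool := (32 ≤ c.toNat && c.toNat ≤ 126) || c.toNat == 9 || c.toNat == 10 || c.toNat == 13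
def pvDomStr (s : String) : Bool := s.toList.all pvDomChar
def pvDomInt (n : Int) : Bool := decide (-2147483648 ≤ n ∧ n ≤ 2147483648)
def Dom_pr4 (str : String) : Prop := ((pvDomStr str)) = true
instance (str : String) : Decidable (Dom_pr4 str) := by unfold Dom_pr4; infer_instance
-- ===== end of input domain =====

-- B replaces A's count-dict plus key-iteration pass by one pass with two sets (seen once / seen more)
-- and a filter of the original word list (objective: alternative, same cost).

-- ===== PORT A =====
def pr4CountLoop (arr : List String) : PySem.Dict String Int :=
  arr.foldl (fun d cuv =>
      if !(d.contains cuv) then d.insert cuv 1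
      else d.insert cuv (d.getD cuv 0 + 1)) PySem.Dict.empty

def pr4 (str : String) : List String :=
  let arr_cuv := (PySem.Str.split? str " ").getD []   -- sep " " ≠ "", so split? is always `some`
  let frecventa := pr4CountLoop arr_cuv
  frecventa.keys.foldl (fun acc key =>
      if frecventa.getD key 0 == 1 then acc ++ [key] else acc) ([] : List String)

-- ===== PORT B =====
def pr4AltStep (st : PySem.Set String × PySem.Set String) (w : String) :
    PySem.Set String × PySem.Set String :=
  if PySem.Set.contains st.1 w then (PySem.Set.discard st.1 w, PySem.Set.add st.2 w)
  else if PySem.Set.contains st.2 w then st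
  else (PySem.Set.add st.1 w, st.2)

def pr4_alt (str : String) : List String :=
  let words := (PySem.Str.split? str " ").getD []   -- sep " " ≠ "", so split? is always `some`
  let st := words.foldl pr4AltStep (PySem.Set.empty, PySem.Set.empty)
  words.filter (fun w => PySem.Set.contains st.1 w)

-- ===== PRECONDITION & SPEC =====
def Spec_pr4 (str : String) (out : List String) : Prop := out = pr4_alt str
instance (str : String) (out : List String) : Decidable (Spec_pr4 str out) := by unfold Spec_pr4; infer_instance

-- ===== CLAIM (what is proved, stated in full; the proofs are below) =====
def Claim_equal_pr4 : Prop := ∀ (str : String), Dom_pr4 str → Spec_pr4 str (pr4 str)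

-- ===== LEMMAS AND PROOFS =====

-- A's counting loop is Counter(arr): its per-word update is an unconditional insert of getD+1.
theorem pr4CountLoop_eq_counter (arr : List String) :
    pr4CountLoop arr = PySem.Dict.counter arr := by
  have hstep : (fun (d : PySem.Dict String Int) cuv =>
      if !(d.contains cuv) then d.insert cuv 1
      else d.insert cuv (d.getD cuv 0 + 1))
      = fun d cuv => d.insert cuv (d.getD cuv 0 + 1) := by
    funext d cuv
    by_cases h : d.contains cuv
    · simp [h]
    · simp only [Bool.not_eq_true] at h
      simp [h, PySem.Dict.getD_of_not_contains d 0 h]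
  unfold pr4CountLoop
  rw [hstep]
  exact PySem.Dict.foldl_insert_getD_add_one_eq_counter arr

-- B's loop invariant: a word is in `seen_once` after processing `l` from state (o, m)
-- iff it is carried over from o and does not occur in l, or is new and occurs exactly once in l.
theorem pr4_B_mem (l : List String) (o m : PySem.Set String) (x : String) :
    x ∈ (l.foldl pr4AltStep (o, m)).1 ↔
      (x ∈ o ∧ l.count x = 0) ∨ (x ∉ o ∧ x ∉ m ∧ l.count x = 1) := by
  induction l generalizing o m with
  | nil => simp
  | cons w t ih =>
    simp only [List.foldl_cons, pr4AltStep]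
    by_cases h1 : w ∈ o
    · rw [if_pos ((PySem.Set.contains_iff o w).mpr h1)]
      rw [ih]
      by_cases hw : x = w
      · subst hw
        simp [PySem.Set.mem_discard, PySem.Set.mem_add, h1]
      · have hw' : ¬ w = x := fun h => hw h.symm
        simp [PySem.Set.mem_discard, PySem.Set.mem_add, hw, hw']
    · rw [if_neg (by simpa [PySem.Set.contains_iff] using h1)]
      by_cases h2 : w ∈ m
      · rw [if_pos ((PySem.Set.contains_iff m w).mpr h2)]
        rw [ih]
        by_cases hw : x = w
        · subst hw
          simp [h1, h2]
        · have hw' : ¬ w = x := fun h => hw h.symm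
          simp [hw']
      · rw [if_neg (by simpa [PySem.Set.contains_iff] using h2)]
        rw [ih]
        by_cases hw : x = w
        · subst hw
          simp [h1, h2]
        · have hw' : ¬ w = x := fun h => hw h.symm
          simp [PySem.Set.mem_add, hw, hw']

theorem pr4_count_tail_le (t : List String) (x y : String) :
    t.count y ≤ (x :: t).count y := by
  simp only [List.count_cons]
  omega

-- Filtering the distinct-words list equals filtering the word list itself,
-- when the predicate only holds for words of count ≤ 1.
theorem pr4_filter_ofList (l : List String) (p : String → Bool)
    (h : ∀ x, p x = true → l.count x ≤ 1) :
    (PySem.Set.ofList l).filter p = l.filter p := by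
  induction l with
  | nil => simp [PySem.Set.ofList_nil]
  | cons x t ih =>
    have ht : ∀ y, p y = true → t.count y ≤ 1 :=
      fun y hy => le_trans (pr4_count_tail_le t x y) (h y hy)
    rw [PySem.Set.ofList_cons]
    by_cases hp : p x = true
    · have hcount := h x hp
      simp only [List.count_cons_self] at hcount
      have hxt : x ∉ t := by
        intro hmem
        have hpos : 0 < t.count x := List.count_pos_iff.mpr hmem
        omega
      have hdisc : (PySem.Set.ofList t).discard x = PySem.Set.ofList t := by
        apply List.filter_eq_self.mpr
        intro a ha
        have hax : a ≠ x := fun hax => hxt ((PySem.Set.mem_ofList t x).mp (hax ▸ ha))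
        simp [hax]
      rw [List.filter_cons_of_pos hp, List.filter_cons_of_pos hp, hdisc, ih ht]
    · have hp' : p x = false := by simpa using hp
      rw [List.filter_cons_of_neg (by simp [hp']), List.filter_cons_of_neg (by simp [hp'])]
      have hcomm : ((PySem.Set.ofList t).discard x).filter p = (PySem.Set.ofList t).filter p := by
        show ((PySem.Set.ofList t).filter _).filter p = _
        rw [List.filter_comm]
        apply List.filter_eq_self.mpr
        intro a ha
        have hpa : p a = true := List.of_mem_filter ha
        have hax : a ≠ x := fun hax => by rw [hax, hp'] at hpa; exact Bool.false_ne_true hpa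
        simp [hax]
      rw [hcomm, ih ht]

-- The whole computation, for an arbitrary word list.
theorem pr4_general (arr : List String) :
    (pr4CountLoop arr).keys.foldl (fun acc key =>
        if (pr4CountLoop arr).getD key 0 == 1 then acc ++ [key] else acc) ([] : List String)
    = arr.filter (fun w =>
        PySem.Set.contains (arr.foldl pr4AltStep (PySem.Set.empty, PySem.Set.empty)).1 w) := by
  rw [pr4CountLoop_eq_counter,
      PySem.List.foldl_append_if (fun k => (PySem.Dict.counter arr).getD k 0 == 1)
        (fun k => k) (PySem.Dict.counter arr).keys ([] : List String)]
  simp only [List.map_id', List.nil_append, PySem.Dict.keys_counter, PySem.Dict.getD_counter]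
  have hB : (arr.filter (fun w =>
      PySem.Set.contains (arr.foldl pr4AltStep (PySem.Set.empty, PySem.Set.empty)).1 w))
      = arr.filter (fun w => ((arr.count w : Int) == 1)) := by
    apply List.filter_congr
    intro w _
    have hmem := pr4_B_mem arr PySem.Set.empty PySem.Set.empty w
    simp only [PySem.Set.empty, List.not_mem_nil, false_and, not_false_iff, true_and,
      false_or] at hmem
    by_cases hc : arr.count w = 1
    · simp [hmem, hc]
    · simp [hmem, hc]
  rw [hB]
  exact pr4_filter_ofList arr _ (fun x hx => by
    have h1 : (arr.count x : Int) = 1 := by simpa using hx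
    omega)

-- ===== VERDICT (by name: the statement is the Claim_ definition above) =====
theorem pr4_spec : Claim_equal_pr4 := by
  intro str _
  show pr4 str = pr4_alt str
  unfold pr4 pr4_alt
  exact pr4_general ((PySem.Str.split? str " ").getD [])
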